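-- pv_equiv track=rewrite | github.com/ilozovsky/echopile | echopile/core/io_readers.py | build_zbl_labels
-- ===== SOURCE A (Python) =====
-- from typing import List, Optional, Tuple, Union
--
-- def build_zbl_labels(section_keys: List[Optional[str]], blow_times: Optional[int] = None) -> List[str]:
--     """Build simple labels for ZBL waveform blocks."""
--     def base_label(key: Optional[str], position: int) -> str:
--         if key is not None:
--             key = str(key).strip()
--             if key.isdigit():
--                 return str(int(key))
--         return str(position)
--
--     section_count = len(section_keys)
--     processed_split = None
--     if section_count >= 2 and section_count % 2 == 0:
--         # Some ZBL exports contain two matching halves of signals.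
--         half = section_count // 2
--         first_numeric = []
--         second_numeric = []
--         for key in section_keys[:half]:
--             first_numeric.append(base_label(key, 0) if key is not None and str(key).strip().isdigit() else None)
--         for key in section_keys[half:]:
--             second_numeric.append(base_label(key, 0) if key is not None and str(key).strip().isdigit() else None)
--
--         # In this app, the first matching half is treated as processed data.
--         if any(key is not None for key in first_numeric) and first_numeric == second_numeric:
--             if blow_times is None or section_count == 2 * blow_times:
--                 processed_split = half
--         elif all(key is None for key in section_keys) and section_count == 2:
--             processed_split = 1
--
--     if processed_split is not None:
--         base_labels = [base_label(section_keys[index], index + 1) for index in range(processed_split)]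
--         processed_labels = [f"{label} (processed)" for label in base_labels]
--         return processed_labels + base_labels
--
--     total_counts = {}
--     for key in section_keys:
--         numeric_key = None
--         if key is not None:
--             key = str(key).strip()
--             if key.isdigit():
--                 numeric_key = str(int(key))
--         total_counts[numeric_key] = total_counts.get(numeric_key, 0) + 1
--
--     labels = []
--     seen_counts = {}
--     for index, key in enumerate(section_keys, start=1):
--         numeric_key = None
--         if key is not None:
--             key = str(key).strip()
--             if key.isdigit():
--                 numeric_key = str(int(key))
--
--         seen_counts[numeric_key] = seen_counts.get(numeric_key, 0) + 1
--         label = base_label(key, index)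
--         if numeric_key is not None and total_counts[numeric_key] > 1:
--             labels.append(f"{label} ({seen_counts[numeric_key]})")
--         else:
--             labels.append(label)
--
--     return labels
-- ===== SOURCE B (Python) =====
-- from typing import List, Optional
--
--
-- def build_zbl_labels(section_keys: List[Optional[str]], blow_times: Optional[int] = None) -> List[str]:
--     """Group-then-scatter re-implementation: normalize keys once, detect the even split
--     on the normalized list, then label group by group (key -> ordered positions),
--     scattering each group's labels into a position->label table read back in order."""
--     n = len(section_keys)
--
--     norm = []
--     for key in section_keys:
--         nk = None
--         if key is not None:
--             stripped = str(key).strip()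
--             if stripped.isdigit():
--                 nk = str(int(stripped))
--         norm.append(nk)
--
--     split = None
--     if n >= 2 and n % 2 == 0:
--         half = n // 2
--         if any(k is not None for k in norm[:half]) and norm[:half] == norm[half:]:
--             if blow_times is None or n == 2 * blow_times:
--                 split = half
--         elif n == 2 and all(k is None for k in section_keys):
--             split = 1
--
--     if split is not None:
--         base = [norm[i] if norm[i] is not None else str(i + 1) for i in range(split)]
--         return [f"{b} (processed)" for b in base] + base
--
--     # Group positions by normalized key.
--     groups = {}
--     for i, k in enumerate(norm):
--         groups.setdefault(k, []).append(i)
--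
--     # Scatter: walk the groups (not the positions) and write each label into its slot.
--     slot = {}
--     for k, positions in groups.items():
--         multi = k is not None and len(positions) > 1
--         for rank, pos in enumerate(positions, start=1):
--             base = k if k is not None else str(pos + 1)
--             slot[pos] = f"{base} ({rank})" if multi else base
--
--     return [slot[i] for i in range(n)]
-- ===== Notes on version B (the rewrite author's own statement) =====
-- stated objective: alternative
-- what changed: B replaces A's index-major single pass with running total/seen counters by a group-major scatter/gather: it groups positions by normalized key, walks the groups writing each group's labels (with ranks from the group's own enumeration) into a position->label table, and finally gathers the table back in index order.
import Mathlib
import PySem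

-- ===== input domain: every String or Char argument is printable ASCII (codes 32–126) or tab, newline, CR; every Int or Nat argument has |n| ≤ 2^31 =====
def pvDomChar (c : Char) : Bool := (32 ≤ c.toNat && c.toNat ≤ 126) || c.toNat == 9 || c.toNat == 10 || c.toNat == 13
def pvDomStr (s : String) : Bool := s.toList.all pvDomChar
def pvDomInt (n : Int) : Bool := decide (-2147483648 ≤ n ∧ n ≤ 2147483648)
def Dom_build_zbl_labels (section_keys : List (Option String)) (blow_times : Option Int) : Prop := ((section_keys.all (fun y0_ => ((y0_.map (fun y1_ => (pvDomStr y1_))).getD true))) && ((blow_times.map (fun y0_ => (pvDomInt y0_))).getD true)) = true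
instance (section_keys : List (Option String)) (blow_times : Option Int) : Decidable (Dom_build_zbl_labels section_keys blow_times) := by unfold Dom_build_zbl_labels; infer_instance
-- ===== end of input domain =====

-- B replaces A's index-major pass with running total/seen counters by a group-major
-- scatter/gather: positions grouped by normalized key, labels written group by group
-- into a position -> label table, gathered back in index order (objective: alternative).

-- ===== PORT A =====

def pvA_base_label (key : Option String) (position : Int) : String :=
  match key with
  | some s =>
      let k := PySem.Str.strip s
      if PySem.Str.strIsdigit k then PySem.Int.toStr ((PySem.Int.ofStr? k).getD 0)
      else PySem.Int.toStr position
  | none => PySem.Int.toStr position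

-- A's repeated inline block: numeric_key = None; if key is not None: ... numeric_key = str(int(key))
def pvA_numeric_key (key : Option String) : Option String :=
  match key with
  | some s =>
      let k := PySem.Str.strip s
      if PySem.Str.strIsdigit k then some (PySem.Int.toStr ((PySem.Int.ofStr? k).getD 0))
      else none
  | none => none

def build_zbl_labels (section_keys : List (Option String)) (blow_times : Option Int) : List String :=
  let section_count := section_keys.length
  let processed_split : Option Nat :=
    if 2 ≤ section_count ∧ section_count % 2 = 0 then
      let half := section_count / 2
      let first_numeric := (PySem.List.slice section_keys none (some (half : Int))).map (fun key =>
        match key with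
        | some s => if PySem.Str.strIsdigit (PySem.Str.strip s) then some (pvA_base_label (some s) 0) else none
        | none => none)
      let second_numeric := (PySem.List.slice section_keys (some (half : Int)) none).map (fun key =>
        match key with
        | some s => if PySem.Str.strIsdigit (PySem.Str.strip s) then some (pvA_base_label (some s) 0) else none
        | none => none)
      if first_numeric.any (fun x => x.isSome) && (first_numeric == second_numeric) then
        if (match blow_times with | none => true | some b => (section_count : Int) == 2 * b) then some half
        else none
      else if section_keys.all (fun key => key.isNone) && (section_count == 2) then some 1
      else none
    else none
  match processed_split with
  | some split =>
      let base_labels := (PySem.List.pyRange 0 (split : Int) 1).map (fun index =>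
        pvA_base_label (PySem.List.pyGetD section_keys index none) (index + 1))
      let processed_labels := base_labels.map (fun label => label ++ " (processed)")
      processed_labels ++ base_labels
  | none =>
      let total_counts : PySem.Dict (Option String) Int :=
        section_keys.foldl (fun d key => d.modify (pvA_numeric_key key) 0 (· + 1)) PySem.Dict.empty
      ((PySem.List.enumerate section_keys 1).foldl
        (fun (st : List String × PySem.Dict (Option String) Int) p =>
          let nk := pvA_numeric_key p.2
          let seen := st.2.modify nk 0 (· + 1)
          let label := pvA_base_label p.2 p.1
          -- total_counts[numeric_key]: the key is always present (inserted by the counting loop), so getD is exact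
          if nk.isSome && decide (1 < total_counts.getD nk 0) then
            (st.1 ++ [label ++ " (" ++ PySem.Int.toStr (seen.getD nk 0) ++ ")"], seen)
          else (st.1 ++ [label], seen))
        ([], PySem.Dict.empty)).1

-- ===== PORT B =====

def pvB_norm (key : Option String) : Option String :=
  match key with
  | none => none
  | some s =>
      let stripped := PySem.Str.strip s
      if PySem.Str.strIsdigit stripped then some (PySem.Int.toStr ((PySem.Int.ofStr? stripped).getD 0))
      else none

def build_zbl_labels_alt (section_keys : List (Option String)) (blow_times : Option Int) : List String :=
  let n := section_keys.length
  let norm := section_keys.map pvB_norm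
  let split : Option Nat :=
    if 2 ≤ n ∧ n % 2 = 0 then
      let half := n / 2
      if (norm.take half).any (fun x => x.isSome) && ((norm.take half) == (norm.drop half)) then
        if (match blow_times with | none => true | some b => (n : Int) == 2 * b) then some half
        else none
      else if (n == 2) && section_keys.all (fun key => key.isNone) then some 1
      else none
    else none
  match split with
  | some sp =>
      let base := (List.range sp).map (fun i => (norm.getD i none).getD (PySem.Int.toStr ((i : Int) + 1)))
      base.map (fun b => b ++ " (processed)") ++ base
  | none =>
      -- group positions by normalized key (setdefault/append ported as modify with default [])
      let groups : PySem.Dict (Option String) (List Int) :=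
        (PySem.List.enumerate norm 0).foldl (fun g p => g.modify p.2 [] (fun l => l ++ [p.1])) PySem.Dict.empty
      -- scatter: walk the groups, writing each group's labels into a position -> label table
      let slot : PySem.Dict Int String :=
        groups.items.foldl (fun s kp =>
          let multi := kp.1.isSome && decide (1 < kp.2.length)
          (PySem.List.enumerate kp.2 1).foldl (fun s rp =>
            let base := kp.1.getD (PySem.Int.toStr (rp.2 + 1))
            s.insert rp.2 (if multi then base ++ " (" ++ PySem.Int.toStr rp.1 ++ ")" else base)) s)
          PySem.Dict.empty
      -- gather: slot[i] — every index 0..n-1 is written exactly once, so the lookup never misses (getD is exact)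
      (PySem.List.pyRange 0 (n : Int) 1).map (fun i => slot.getD i "")

-- ===== PRECONDITION & SPEC =====
def Spec_build_zbl_labels (section_keys : List (Option String)) (blow_times : Option Int) (out : List String) : Prop := out = build_zbl_labels_alt section_keys blow_times
instance (section_keys : List (Option String)) (blow_times : Option Int) (out : List String) : Decidable (Spec_build_zbl_labels section_keys blow_times out) := by unfold Spec_build_zbl_labels; infer_instance

-- ===== CLAIM (what is proved, stated in full; the proofs are below) =====
def Claim_equal_build_zbl_labels : Prop := ∀ (section_keys : List (Option String)) (blow_times : Option Int), Dom_build_zbl_labels section_keys blow_times → Spec_build_zbl_labels section_keys blow_times (build_zbl_labels section_keys blow_times)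

-- ===== LEMMAS AND PROOFS =====

theorem pvA_numeric_key_eq : pvA_numeric_key = pvB_norm := by
  funext key
  cases key <;> simp [pvA_numeric_key, pvB_norm]

theorem pvA_total_getD (section_keys : List (Option String)) (v : Option String) :
    (section_keys.foldl (fun d key => d.modify (pvA_numeric_key key) 0 (· + 1)) PySem.Dict.empty).getD v 0
      = ((section_keys.map pvB_norm).count v : Int) := by
  rw [pvA_numeric_key_eq,
    ← List.foldl_map (f := pvB_norm)
      (g := fun (d : PySem.Dict (Option String) Int) x => d.modify x 0 (· + 1)),
    PySem.Dict.getD_foldl_modify_add_one]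
  simp

-- positions (ints, starting at s) at which the list holds v
def pvPosns (xs : List (Option String)) (s : Int) (v : Option String) : List Int :=
  ((PySem.List.enumerate xs s).filter (fun p => p.2 == v)).map (fun p => p.1)

theorem pvPosns_length (xs : List (Option String)) (s : Int) (v : Option String) :
    (pvPosns xs s v).length = xs.count v := by
  induction xs generalizing s with
  | nil => simp [pvPosns, PySem.List.enumerate]
  | cons x xs ih =>
      by_cases h : x = v <;>
        simp [pvPosns, PySem.List.enumerate_cons, h, ← ih (s+1)]

theorem pvPosns_cons_pos (x : Option String) (xs : List (Option String)) (s : Int) (v : Option String)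
    (h : x = v) : pvPosns (x :: xs) s v = s :: pvPosns xs (s + 1) v := by
  simp [pvPosns, PySem.List.enumerate_cons, h]

theorem pvPosns_cons_neg (x : Option String) (xs : List (Option String)) (s : Int) (v : Option String)
    (h : ¬ x = v) : pvPosns (x :: xs) s v = pvPosns xs (s + 1) v := by
  simp [pvPosns, PySem.List.enumerate_cons, h]

-- membership in the enumerate list pins down index and element
theorem pvMem_enumerate {α : Type} (xs : List α) (s : Int) (p : Int × α)
    (hp : p ∈ PySem.List.enumerate xs s) :
    ∃ (k : Nat) (hk : k < xs.length), p.1 = s + k ∧ p.2 = xs[k] := by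
  induction xs generalizing s with
  | nil => simp [PySem.List.enumerate] at hp
  | cons x xs ih =>
      rw [PySem.List.enumerate_cons] at hp
      rcases List.mem_cons.mp hp with h | h
      · exact ⟨0, by simp, by simp [h], by simp [h]⟩
      · obtain ⟨k, hk, h1, h2⟩ := ih (s + 1) h
        exact ⟨k + 1, by simpa using hk, by rw [h1]; push_cast; ring, by simpa using h2⟩

theorem pvPosns_mem (xs : List (Option String)) (s : Int) (v : Option String) (j : Int)
    (hj : j ∈ pvPosns xs s v) :
    ∃ (k : Nat) (hk : k < xs.length), j = s + k ∧ xs[k] = v := by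
  obtain ⟨p, hp, hfst⟩ := List.mem_map.mp hj
  have hp2 := List.mem_filter.mp hp
  obtain ⟨k, hk, h1, h2⟩ := pvMem_enumerate xs s p hp2.1
  exact ⟨k, hk, by rw [← hfst, h1], by rw [← h2]; simpa using hp2.2⟩

theorem pvPosns_pairwise (xs : List (Option String)) (s : Int) (v : Option String) :
    (pvPosns xs s v).Pairwise (· < ·) := by
  have h1 : (PySem.List.enumerate xs s).Pairwise (fun p q => p.1 < q.1) := by
    have h := PySem.List.pairwise_lt_pyRange_one s (s + xs.length)
    rw [← PySem.List.map_fst_enumerate xs s] at h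
    exact List.pairwise_map.mp h
  exact List.pairwise_map.mpr (h1.sublist List.filter_sublist)

theorem pvPosns_nodup (xs : List (Option String)) (s : Int) (v : Option String) :
    (pvPosns xs s v).Nodup :=
  (pvPosns_pairwise xs s v).imp (fun h => ne_of_lt h)

theorem pvPosns_disjoint (xs : List (Option String)) (v v' : Option String) (hne : v ≠ v') :
    List.Disjoint (pvPosns xs 0 v) (pvPosns xs 0 v') := by
  intro j hj hj'
  obtain ⟨k, hk, h1, h2⟩ := pvPosns_mem xs 0 v j hj
  obtain ⟨k', hk', h1', h2'⟩ := pvPosns_mem xs 0 v' j hj'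
  have : k = k' := by omega
  exact hne (by rw [← h2, ← h2']; subst this; rfl)

-- the k-th occurrence of v sits in the enumerated positions list with rank (count before k)
theorem pvPosns_mem_enum (xs : List (Option String)) (s e : Int) (v : Option String) :
    ∀ (k : Nat) (hk : k < xs.length), xs[k] = v →
    (e + ((xs.take k).count v : Int), s + k) ∈ PySem.List.enumerate (pvPosns xs s v) e := by
  induction xs generalizing s e with
  | nil => intro k hk; simp at hk
  | cons x xs ih =>
      intro k hk hv
      cases k with
      | zero =>
          simp only [List.getElem_cons_zero] at hv
          rw [pvPosns_cons_pos x xs s v hv, PySem.List.enumerate_cons]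
          simp
      | succ k =>
          have hk' : k < xs.length := by simpa using hk
          have hv' : xs[k]'hk' = v := by simpa using hv
          by_cases h : x = v
          · rw [pvPosns_cons_pos x xs s v h, PySem.List.enumerate_cons]
            have := ih (s + 1) (e + 1) k hk' hv'
            apply List.mem_cons_of_mem
            have harr : e + (((x :: xs).take (k + 1)).count v : Int) = e + 1 + ((xs.take k).count v : Int) := by
              simp [h]; omega
            have harr2 : s + ((k : Nat) + 1 : Nat) = (s + 1) + (k : Nat) := by push_cast; ring
            rw [harr, harr2]
            exact this
          · rw [pvPosns_cons_neg x xs s v h]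
            have := ih (s + 1) e k hk' hv'
            have harr : e + (((x :: xs).take (k + 1)).count v : Int) = e + ((xs.take k).count v : Int) := by
              simp [h]
            have harr2 : s + ((k : Nat) + 1 : Nat) = (s + 1) + (k : Nat) := by push_cast; ring
            rw [harr, harr2]
            exact this

-- B's groups dict, named for the proofs (definitionally the port's let-bound fold)
def pvGroups (norm : List (Option String)) : PySem.Dict (Option String) (List Int) :=
  (PySem.List.enumerate norm 0).foldl (fun g p => g.modify p.2 [] (fun l => l ++ [p.1])) PySem.Dict.empty

theorem pvGroups_getD (norm : List (Option String)) (v : Option String) :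
    (pvGroups norm).getD v [] = pvPosns norm 0 v := by
  unfold pvGroups
  rw [← List.foldl_map (f := fun (p : Int × Option String) => (p.2, p.1))
      (g := fun (g' : PySem.Dict (Option String) (List Int)) (q : Option String × Int) =>
        g'.modify q.1 [] (fun l => l ++ [q.2])),
    PySem.Dict.getD_foldl_modify_append]
  simp [pvPosns, List.filter_map, Function.comp_def]

theorem pvGroups_keys (norm : List (Option String)) :
    (pvGroups norm).keys = PySem.Set.ofList norm := by
  unfold pvGroups
  rw [PySem.Dict.keys_foldl_modify_key (PySem.List.enumerate norm 0) (fun p => p.2) []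
      (fun _ p l => l ++ [p.1]) PySem.Dict.empty]
  rw [PySem.List.map_snd_enumerate, PySem.Dict.keys_empty, PySem.Set.update_nil_left]

theorem pvGroups_keys_nodup (norm : List (Option String)) : (pvGroups norm).keys.Nodup := by
  unfold pvGroups
  exact PySem.Dict.nodup_keys_foldl_modify_key (PySem.List.enumerate norm 0) (fun p => p.2) []
      (fun _ p l => l ++ [p.1]) PySem.Dict.empty (by simp [PySem.Dict.keys_empty])

theorem pvGroups_items (norm : List (Option String)) :
    (pvGroups norm).items = (PySem.Set.ofList norm).map (fun k => (k, pvPosns norm 0 k)) := by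
  rw [PySem.Dict.items_eq_map_keys (pvGroups norm) (pvGroups_keys_nodup norm) []]
  rw [pvGroups_keys]
  exact List.map_congr_left (fun k _ => by rw [pvGroups_getD])

-- the label B writes for position rp.2 with 1-based rank rp.1 in group kp
def pvVal (kp : Option String × List Int) (rp : Int × Int) : String :=
  let base := kp.1.getD (PySem.Int.toStr (rp.2 + 1))
  if kp.1.isSome && decide (1 < kp.2.length) then base ++ " (" ++ PySem.Int.toStr rp.1 ++ ")" else base

def pvPairs (kp : Option String × List Int) : List (Int × String) :=
  (PySem.List.enumerate kp.2 1).map (fun rp => (rp.2, pvVal kp rp))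

theorem pvPairs_fst (kp : Option String × List Int) :
    (pvPairs kp).map Prod.fst = kp.2 := by
  simp only [pvPairs, List.map_map]
  exact PySem.List.map_snd_enumerate kp.2 1

-- expected label at index j (matches A's per-index formula)
def pvExp (norm : List (Option String)) (j : Nat) : String :=
  let k := norm.getD j none
  let base := k.getD (PySem.Int.toStr ((j : Int) + 1))
  if k.isSome && decide (1 < norm.count k) then
    base ++ " (" ++ PySem.Int.toStr (((norm.take j).count k : Int) + 1) ++ ")"
  else base

theorem pvGetD_foldl_ins_not_mem (pairs : List (Int × String)) (d : PySem.Dict Int String)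
    (k : Int) (d0 : String) (h : k ∉ pairs.map Prod.fst) :
    (pairs.foldl (fun s p => s.insert p.1 p.2) d).getD k d0 = d.getD k d0 := by
  induction pairs generalizing d with
  | nil => rfl
  | cons p ps ih =>
      simp only [List.map_cons, List.mem_cons, not_or] at h
      rw [List.foldl_cons, ih _ h.2, PySem.Dict.getD_insert_of_ne _ _ _ h.1]

theorem pvGetD_foldl_ins_mem (pairs : List (Int × String)) (hnd : (pairs.map Prod.fst).Nodup)
    (k : Int) (v : String) (hmem : (k, v) ∈ pairs) (d : PySem.Dict Int String) (d0 : String) :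
    (pairs.foldl (fun s p => s.insert p.1 p.2) d).getD k d0 = v := by
  induction pairs generalizing d with
  | nil => simp at hmem
  | cons p ps ih =>
      simp only [List.map_cons, List.nodup_cons] at hnd
      rcases List.mem_cons.mp hmem with h | h
      · subst h
        rw [List.foldl_cons, pvGetD_foldl_ins_not_mem ps _ k d0 hnd.1,
          PySem.Dict.getD_insert_self]
      · rw [List.foldl_cons]
        exact ih hnd.2 h _

theorem pvP_fst (norm : List (Option String)) :
    ((pvGroups norm).items.flatMap pvPairs).map Prod.fst
      = (PySem.Set.ofList norm).flatMap (fun k => pvPosns norm 0 k) := by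
  rw [pvGroups_items, List.map_flatMap, List.flatMap_map]
  exact List.flatMap_congr (fun k _ => pvPairs_fst _)

theorem pvP_fst_nodup (norm : List (Option String)) :
    (((pvGroups norm).items.flatMap pvPairs).map Prod.fst).Nodup := by
  rw [pvP_fst]
  refine List.nodup_flatMap.mpr ⟨fun k _ => pvPosns_nodup norm 0 k, ?_⟩
  have hnd : (PySem.Set.ofList norm : List (Option String)).Nodup := PySem.Set.nodup_ofList norm
  exact List.Pairwise.imp₂ (fun v v' hne _ => pvPosns_disjoint norm v v' hne)
    (List.nodup_iff_pairwise_ne.mp hnd) (List.pairwise_of_forall (fun _ _ => trivial))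

theorem pvP_mem (norm : List (Option String)) (j : Nat) (hj : j < norm.length) :
    ((j : Int), pvExp norm j) ∈ (pvGroups norm).items.flatMap pvPairs := by
  rw [pvGroups_items]
  apply List.mem_flatMap.mpr
  refine ⟨(norm[j], pvPosns norm 0 norm[j]), List.mem_map_of_mem ((PySem.Set.mem_ofList norm _).mpr (norm.getElem_mem hj)), ?_⟩
  apply List.mem_map.mpr
  refine ⟨(1 + ((norm.take j).count norm[j] : Int), 0 + (j : Int)),
    pvPosns_mem_enum norm 0 1 norm[j] j hj rfl, ?_⟩
  have hz : (0 : Int) + (j : Int) = (j : Int) := by ring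
  simp only [pvVal, pvExp, hz, pvPosns_length, List.getD_eq_getElem norm none hj,
    Prod.mk.injEq]
  have hc : (1 : Int) + ((norm.take j).count norm[j] : Int)
      = ((norm.take j).count norm[j] : Int) + 1 := by ring
  rw [hc]
  exact ⟨trivial, rfl⟩

-- the trace of A's labelling loop (shared reference list)
def pvRef (normAll : List (Option String)) : List (Option String) → List (Option String) → List String
  | _, [] => []
  | pre, key :: rest =>
      let nk := pvB_norm key
      let base := nk.getD (PySem.Int.toStr ((pre.length : Int) + 1))
      (if nk.isSome && decide (1 < (normAll.count nk : Int)) then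
        base ++ " (" ++ PySem.Int.toStr (((pre.map pvB_norm).count nk : Int) + 1) ++ ")"
      else base) :: pvRef normAll (pre ++ [key]) rest

theorem pvA_base_label_eq (key : Option String) (position : Int) :
    pvA_base_label key position = (pvB_norm key).getD (PySem.Int.toStr position) := by
  cases key with
  | none => rfl
  | some s =>
      simp only [pvA_base_label, pvB_norm]
      split <;> simp

theorem pvA_loop (total : PySem.Dict (Option String) Int) (normAll : List (Option String))
    (htot : ∀ v, total.getD v 0 = (normAll.count v : Int)) :
    ∀ (rest pre : List (Option String)) (labels0 : List String),
    ((PySem.List.enumerate rest ((pre.length : Int) + 1)).foldl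
      (fun (st : List String × PySem.Dict (Option String) Int) p =>
        let nk := pvA_numeric_key p.2
        let seen := st.2.modify nk 0 (· + 1)
        let label := pvA_base_label p.2 p.1
        if nk.isSome && decide (1 < total.getD nk 0) then
          (st.1 ++ [label ++ " (" ++ PySem.Int.toStr (seen.getD nk 0) ++ ")"], seen)
        else (st.1 ++ [label], seen))
      (labels0, PySem.Dict.counter (pre.map pvB_norm))).1
      = labels0 ++ pvRef normAll pre rest := by
  intro rest
  induction rest with
  | nil => intro pre labels0; simp [PySem.List.enumerate, pvRef]
  | cons key rest ih =>
      intro pre labels0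
      rw [PySem.List.enumerate_cons, List.foldl_cons]
      have hseen : (PySem.Dict.counter (pre.map pvB_norm)).modify (pvB_norm key) 0 (· + 1)
          = PySem.Dict.counter ((pre ++ [key]).map pvB_norm) := by
        simp only [List.map_append, List.map_cons, List.map_nil]
        rw [PySem.Dict.counter_append_singleton]
      have hstart : (pre.length : Int) + 1 + 1 = (((pre ++ [key]).length : Nat) : Int) + 1 := by
        simp
      simp only [pvA_numeric_key_eq, htot, pvA_base_label_eq] at ih ⊢
      by_cases hc : ((pvB_norm key).isSome
          && decide (1 < ((List.count (pvB_norm key) normAll : Nat) : Int))) = true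
      · rw [if_pos hc, PySem.Dict.getD_modify_self, PySem.Dict.getD_counter, hseen, hstart]
        refine (ih (pre ++ [key]) _).trans ?_
        simp only [pvRef]
        rw [if_pos hc]
        simp
      · rw [if_neg hc, hseen, hstart]
        refine (ih (pre ++ [key]) _).trans ?_
        simp only [pvRef]
        rw [if_neg hc]
        simp

-- A's trace, read off per index
theorem pvRef_eq_map (normAll : List (Option String)) :
    ∀ (rest pre : List (Option String)), normAll = (pre ++ rest).map pvB_norm →
    pvRef normAll pre rest
      = (List.range rest.length).map (fun t => pvExp normAll (pre.length + t)) := by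
  intro rest
  induction rest with
  | nil => intro pre _; simp [pvRef]
  | cons key rest ih =>
      intro pre hnorm
      have hlen : pre.length < normAll.length := by subst hnorm; simp
      have hget : normAll[pre.length]'hlen = pvB_norm key := by subst hnorm; simp
      have htake : normAll.take pre.length = pre.map pvB_norm := by
        subst hnorm
        rw [List.map_append, List.take_left' (by simp)]
      have hnorm2 : normAll = ((pre ++ [key]) ++ rest).map pvB_norm := by
        rw [hnorm, List.append_cons]
      simp only [pvRef, List.length_cons, List.range_succ_eq_map, List.map_cons, List.map_map]
      congr 1
      · -- head element
        simp only [pvExp, Nat.add_zero, List.getD_eq_getElem normAll none hlen, hget, htake]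
        have hcond : decide (1 < ((List.count (pvB_norm key) normAll : Nat) : Int))
            = decide (1 < List.count (pvB_norm key) normAll) := by simp
        rw [hcond]
      · rw [ih (pre ++ [key]) hnorm2]
        refine List.map_congr_left (fun t _ => ?_)
        have : pre.length + Nat.succ t = (pre ++ [key]).length + t := by simp; omega
        simp only [Function.comp_apply, this]

-- B's scatter table, read off per index
theorem pv_slot_getD (norm : List (Option String)) (j : Nat) (hj : j < norm.length) :
    ((pvGroups norm).items.foldl (fun s kp =>
        let multi := kp.1.isSome && decide (1 < kp.2.length)
        (PySem.List.enumerate kp.2 1).foldl (fun s rp =>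
          let base := kp.1.getD (PySem.Int.toStr (rp.2 + 1))
          s.insert rp.2 (if multi then base ++ " (" ++ PySem.Int.toStr rp.1 ++ ")" else base)) s)
        PySem.Dict.empty).getD (j : Int) ""
      = pvExp norm j := by
  have hfold : ((pvGroups norm).items.foldl (fun s kp =>
        let multi := kp.1.isSome && decide (1 < kp.2.length)
        (PySem.List.enumerate kp.2 1).foldl (fun s rp =>
          let base := kp.1.getD (PySem.Int.toStr (rp.2 + 1))
          s.insert rp.2 (if multi then base ++ " (" ++ PySem.Int.toStr rp.1 ++ ")" else base)) s)
        PySem.Dict.empty)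
      = ((pvGroups norm).items.flatMap pvPairs).foldl (fun s p => s.insert p.1 p.2)
          PySem.Dict.empty := by
    rw [List.foldl_flatMap]
    simp only [pvPairs, pvVal, List.foldl_map]
  rw [hfold]
  exact pvGetD_foldl_ins_mem _ (pvP_fst_nodup norm) _ _ (pvP_mem norm j hj) _ _

theorem pv_split_out_eq (section_keys : List (Option String)) (sp : Nat) (hsp : sp ≤ section_keys.length) :
    (PySem.List.pyRange 0 (sp : Int) 1).map (fun index =>
        pvA_base_label (PySem.List.pyGetD section_keys index none) (index + 1))
      = (List.range sp).map (fun i =>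
        ((section_keys.map pvB_norm).getD i none).getD (PySem.Int.toStr ((i : Int) + 1))) := by
  rw [PySem.List.pyRange_zero_nat, List.map_map]
  refine List.map_congr_left ?_
  intro i hi
  rw [List.mem_range] at hi
  have hilen : i < section_keys.length := lt_of_lt_of_le hi hsp
  simp only [Function.comp_apply, PySem.List.pyGetD_natCast, pvA_base_label_eq]
  congr 1
  rw [List.getD_eq_getElem _ _ hilen, List.getD_eq_getElem _ _ (by simpa using hilen)]
  simp

theorem pvA_first_numeric_eq :
    (fun (key : Option String) =>
      match key with
      | some s => if PySem.Str.strIsdigit (PySem.Str.strip s) then some (pvA_base_label (some s) 0) else none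
      | none => none) = pvB_norm := by
  funext key
  cases key with
  | none => rfl
  | some s =>
      simp only [pvB_norm, pvA_base_label]
      split <;> simp_all

theorem pv_split_eq (section_keys : List (Option String)) (blow_times : Option Int) :
    (let section_count := section_keys.length
     if 2 ≤ section_count ∧ section_count % 2 = 0 then
      let half := section_count / 2
      let first_numeric := (PySem.List.slice section_keys none (some (half : Int))).map (fun key =>
        match key with
        | some s => if PySem.Str.strIsdigit (PySem.Str.strip s) then some (pvA_base_label (some s) 0) else none
        | none => none)
      let second_numeric := (PySem.List.slice section_keys (some (half : Int)) none).map (fun key =>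
        match key with
        | some s => if PySem.Str.strIsdigit (PySem.Str.strip s) then some (pvA_base_label (some s) 0) else none
        | none => none)
      if first_numeric.any (fun x => x.isSome) && (first_numeric == second_numeric) then
        if (match blow_times with | none => true | some b => (section_count : Int) == 2 * b) then some half
        else none
      else if section_keys.all (fun key => key.isNone) && (section_count == 2) then some 1
      else none
     else none)
    = (let n := section_keys.length
       let norm := section_keys.map pvB_norm
       if 2 ≤ n ∧ n % 2 = 0 then
        let half := n / 2
        if (norm.take half).any (fun x => x.isSome) && ((norm.take half) == (norm.drop half)) then
          if (match blow_times with | none => true | some b => (n : Int) == 2 * b) then some half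
          else none
        else if (n == 2) && section_keys.all (fun key => key.isNone) then some 1
        else none
       else none) := by
  dsimp only
  rw [pvA_first_numeric_eq, PySem.List.slice_to_natCast, PySem.List.slice_from_natCast,
    List.map_take, List.map_drop,
    Bool.and_comm (section_keys.all (fun key => key.isNone)) (section_keys.length == 2)]

theorem pv_split_le (section_keys : List (Option String)) (blow_times : Option Int) (sp : Nat)
    (h : (let n := section_keys.length
       let norm := section_keys.map pvB_norm
       if 2 ≤ n ∧ n % 2 = 0 then
        let half := n / 2
        if (norm.take half).any (fun x => x.isSome) && ((norm.take half) == (norm.drop half)) then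
          if (match blow_times with | none => true | some b => (n : Int) == 2 * b) then some half
          else none
        else if (n == 2) && section_keys.all (fun key => key.isNone) then some 1
        else none
       else none) = some sp) : sp ≤ section_keys.length := by
  dsimp only at h
  split_ifs at h <;> simp_all <;> omega

theorem pv_main (section_keys : List (Option String)) (blow_times : Option Int) :
    build_zbl_labels section_keys blow_times = build_zbl_labels_alt section_keys blow_times := by
  unfold build_zbl_labels build_zbl_labels_alt
  have hs := pv_split_eq section_keys blow_times
  dsimp only at hs ⊢
  rw [hs]
  cases hsp : (let n := section_keys.length
       let norm := section_keys.map pvB_norm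
       if 2 ≤ n ∧ n % 2 = 0 then
        let half := n / 2
        if (norm.take half).any (fun x => x.isSome) && ((norm.take half) == (norm.drop half)) then
          if (match blow_times with | none => true | some b => (n : Int) == 2 * b) then some half
          else none
        else if (n == 2) && section_keys.all (fun key => key.isNone) then some 1
        else none
       else none) with
  | some sp =>
      dsimp only
      rw [pv_split_out_eq section_keys sp (pv_split_le section_keys blow_times sp hsp)]
  | none =>
      dsimp only
      have h2 : pvRef (section_keys.map pvB_norm) [] section_keys
          = (PySem.List.pyRange 0 (section_keys.length : Int) 1).map (fun i =>
              ((pvGroups (section_keys.map pvB_norm)).items.foldl (fun s kp =>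
                  let multi := kp.1.isSome && decide (1 < kp.2.length)
                  (PySem.List.enumerate kp.2 1).foldl (fun s rp =>
                    let base := kp.1.getD (PySem.Int.toStr (rp.2 + 1))
                    s.insert rp.2 (if multi then base ++ " (" ++ PySem.Int.toStr rp.1 ++ ")" else base)) s)
                  PySem.Dict.empty).getD i "") := by
        rw [pvRef_eq_map (section_keys.map pvB_norm) section_keys [] (by simp),
          PySem.List.pyRange_zero_nat, List.map_map]
        refine List.map_congr_left (fun j hjm => ?_)
        rw [List.mem_range] at hjm
        have hj : j < (section_keys.map pvB_norm).length := by simpa using hjm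
        simp only [Function.comp_apply, List.length_nil, Nat.zero_add]
        exact (pv_slot_getD (section_keys.map pvB_norm) j hj).symm
      exact (pvA_loop _ (section_keys.map pvB_norm) (pvA_total_getD section_keys)
          section_keys [] []).trans h2

-- ===== VERDICT (by name: the statement is the Claim_ definition above) =====
theorem build_zbl_labels_spec : Claim_equal_build_zbl_labels := by
  intro section_keys blow_times _
  unfold Spec_build_zbl_labels
  exact pv_main section_keys blow_times
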